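-- pv_equiv track=rewrite | github.com/payalkanyan/parser | src/extract/extraction_engine.py | _map_lob_to_canonical
-- ===== SOURCE A (Python) =====
-- def _map_lob_to_canonical(lob: str) -> str:
--     """Map LOB variant to canonical form (copied from NER extractor)"""
--     lob_lower = lob.lower()
--
--     if any(x in lob_lower for x in ['medicare', 'part a', 'part b', 'part c', 'part d']):
--         return 'Medicare'
--     elif any(x in lob_lower for x in ['medicaid', 'medi-cal']):
--         return 'Medicaid'
--     elif any(x in lob_lower for x in ['commercial', 'hmo', 'ppo', 'epo', 'pos', 'exchange']):
--         return 'Commercial'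
--     else:
--         return lob.title()
-- ===== SOURCE B (Python) =====
-- # B: single left-to-right scan over the lowered string, testing at every position which
-- # keywords START there and keeping the best (lowest) category rank seen; one final
-- # rank -> label resolution.  A instead runs a separate substring search per category.
-- _RANKED_KEYWORDS = [
--     ('medicare', 0), ('part a', 0), ('part b', 0), ('part c', 0), ('part d', 0),
--     ('medicaid', 1), ('medi-cal', 1),
--     ('commercial', 2), ('hmo', 2), ('ppo', 2), ('epo', 2), ('pos', 2), ('exchange', 2),
-- ]
-- _LABELS = ['Medicare', 'Medicaid', 'Commercial']
--
-- def _map_lob_to_canonical(lob: str) -> str: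
--     low = lob.lower()
--     best = 3
--     for i in range(len(low)):
--         for kw, rank in _RANKED_KEYWORDS:
--             if rank < best and low.startswith(kw, i):
--                 best = rank
--     return _LABELS[best] if best < 3 else lob.title()
-- ===== Notes on version B (the rewrite author's own statement) =====
-- stated objective: alternative
-- what changed: Instead of A's per-category any-substring tests in an if/elif cascade, B makes one left-to-right scan over the positions of the lowered string, testing which keywords start at each position and keeping the minimum category rank seen, then resolves the rank to a label once.
import Mathlib
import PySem

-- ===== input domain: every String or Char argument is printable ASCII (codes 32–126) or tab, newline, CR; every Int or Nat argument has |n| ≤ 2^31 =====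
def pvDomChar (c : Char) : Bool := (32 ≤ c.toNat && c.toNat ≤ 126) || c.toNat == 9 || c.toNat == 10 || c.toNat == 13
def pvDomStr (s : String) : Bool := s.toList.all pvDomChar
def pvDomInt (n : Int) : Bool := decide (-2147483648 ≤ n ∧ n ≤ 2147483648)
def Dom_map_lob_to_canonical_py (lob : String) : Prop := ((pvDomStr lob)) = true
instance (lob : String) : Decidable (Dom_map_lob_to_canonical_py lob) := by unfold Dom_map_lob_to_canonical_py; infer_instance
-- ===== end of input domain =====

-- B replaces A's per-category substring searches by a single left-to-right scan over the
-- positions of the lowered string keeping the best (lowest) matched category rank (alternative).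

-- ===== PORT A =====
-- str.title() is not in PySem; hand port, exact on ASCII (where 'cased' = alphabetic):
-- an alphabetic char is uppercased after a non-cased char, lowercased after a cased one.
def pyTitleGo : List Char → Bool → List Char
  | [], _ => []
  | c :: cs, prevCased =>
    if PySem.Chars.isalpha c then
      (if prevCased then PySem.Chars.lowerChar c else PySem.Chars.upperChar c) :: pyTitleGo cs true
    else
      c :: pyTitleGo cs false

def pyTitle (s : String) : String := String.ofList (pyTitleGo s.toList false)

def map_lob_to_canonical_py (lob : String) : String :=
  let lobLower := PySem.Str.lower lob
  if ["medicare", "part a", "part b", "part c", "part d"].any (fun x => PySem.Str.isIn x lobLower) then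
    "Medicare"
  else if ["medicaid", "medi-cal"].any (fun x => PySem.Str.isIn x lobLower) then
    "Medicaid"
  else if ["commercial", "hmo", "ppo", "epo", "pos", "exchange"].any (fun x => PySem.Str.isIn x lobLower) then
    "Commercial"
  else
    pyTitle lob

-- ===== PORT B =====
def pvRankedKws : List (String × Nat) :=
  [("medicare", 0), ("part a", 0), ("part b", 0), ("part c", 0), ("part d", 0),
   ("medicaid", 1), ("medi-cal", 1),
   ("commercial", 2), ("hmo", 2), ("ppo", 2), ("epo", 2), ("pos", 2), ("exchange", 2)]

def pvLobLabels : List String := ["Medicare", "Medicaid", "Commercial"]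

-- low.startswith(kw, i) with 0 ≤ i is exactly: kw is a prefix of low[i:] (Chars.startswith
-- on the dropped list); i comes from range(len(low)) so i.toNat is exact.
def map_lob_to_canonical_py_alt (lob : String) : String :=
  let low := PySem.Str.lower lob
  let best := (PySem.List.pyRange 0 (PySem.Str.len low) 1).foldl
    (fun b i => pvRankedKws.foldl
      (fun b p =>
        if p.2 < b ∧ PySem.Chars.startswith (low.toList.drop i.toNat) p.1.toList = true
        then p.2 else b) b) 3
  if best < 3 then
    -- _LABELS[best]: the guard best < 3 makes the none branch unreachable
    (PySem.List.pyGet? pvLobLabels (Int.ofNat best)).getD ""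
  else pyTitle lob

-- ===== PRECONDITION & SPEC =====
def Spec_map_lob_to_canonical_py (lob : String) (out : String) : Prop := out = map_lob_to_canonical_py_alt lob
instance (lob : String) (out : String) : Decidable (Spec_map_lob_to_canonical_py lob out) := by unfold Spec_map_lob_to_canonical_py; infer_instance

-- ===== CLAIM (what is proved, stated in full; the proofs are below) =====
def Claim_equal_map_lob_to_canonical_py : Prop := ∀ (lob : String), Dom_map_lob_to_canonical_py lob → Spec_map_lob_to_canonical_py lob (map_lob_to_canonical_py lob)

-- ===== LEMMAS AND PROOFS =====

-- the inner fold over the keyword table, characterised by its ≤-behaviour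
theorem pvInner_le_iff (l : List Char) (i : Int) (kws : List (String × Nat)) (b r : Nat) :
    (kws.foldl (fun b p =>
        if p.2 < b ∧ PySem.Chars.startswith (l.drop i.toNat) p.1.toList = true
        then p.2 else b) b) ≤ r
    ↔ b ≤ r ∨ ∃ p ∈ kws, p.2 ≤ r ∧ PySem.Chars.startswith (l.drop i.toNat) p.1.toList = true := by
  induction kws generalizing b with
  | nil => simp
  | cons q qs ih =>
    simp only [List.foldl_cons, List.mem_cons, ih]
    split_ifs with h
    · constructor
      · rintro (h1 | ⟨p, hp, h2, h3⟩)
        · exact Or.inr ⟨q, Or.inl rfl, h1, h.2⟩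
        · exact Or.inr ⟨p, Or.inr hp, h2, h3⟩
      · rintro (h1 | ⟨p, rfl | hp, h2, h3⟩)
        · exact Or.inl (le_trans (Nat.le_of_lt h.1) h1)
        · exact Or.inl h2
        · exact Or.inr ⟨p, hp, h2, h3⟩
    · constructor
      · rintro (h1 | ⟨p, hp, h2, h3⟩)
        · exact Or.inl h1
        · exact Or.inr ⟨p, Or.inr hp, h2, h3⟩
      · rintro (h1 | ⟨p, rfl | hp, h2, h3⟩)
        · exact Or.inl h1
        · rcases Decidable.not_and_iff_or_not.mp h with h' | h'
          · exact Or.inl (by omega)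
          · exact absurd h3 h'
        · exact Or.inr ⟨p, hp, h2, h3⟩

-- the outer fold over the index list
theorem pvBest_le_iff (l : List Char) (idxs : List Int) (b r : Nat) :
    (idxs.foldl (fun b i => pvRankedKws.foldl
        (fun b p =>
          if p.2 < b ∧ PySem.Chars.startswith (l.drop i.toNat) p.1.toList = true
          then p.2 else b) b) b) ≤ r
    ↔ b ≤ r ∨ ∃ p ∈ pvRankedKws, p.2 ≤ r ∧
        ∃ i ∈ idxs, PySem.Chars.startswith (l.drop i.toNat) p.1.toList = true := by
  induction idxs generalizing b with
  | nil => simp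
  | cons j js ih =>
    simp only [List.foldl_cons, ih, pvInner_le_iff]
    constructor
    · rintro ((h1 | ⟨p, hp, h2, h3⟩) | ⟨p, hp, h2, i, hi, h3⟩)
      · exact Or.inl h1
      · exact Or.inr ⟨p, hp, h2, j, by simp, h3⟩
      · exact Or.inr ⟨p, hp, h2, i, List.mem_cons_of_mem _ hi, h3⟩
    · rintro (h1 | ⟨p, hp, h2, i, hi, h3⟩)
      · exact Or.inl (Or.inl h1)
      · rcases List.mem_cons.mp hi with rfl | hi
        · exact Or.inl (Or.inr ⟨p, hp, h2, h3⟩)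
        · exact Or.inr ⟨p, hp, h2, i, hi, h3⟩

-- 'kw in s' (nonempty kw) ↔ kw starts at some position of range(len(s))
theorem pvIsIn_iff_pos (kw s : String) (hk : kw.toList ≠ []) :
    PySem.Str.isIn kw s = true
    ↔ ∃ i ∈ PySem.List.pyRange 0 (PySem.Str.len s) 1,
        PySem.Chars.startswith (s.toList.drop i.toNat) kw.toList = true := by
  rw [PySem.Str.isIn_iff_infix]
  have h1 : kw.toList <:+: s.toList ↔ ∃ j : Nat, kw.toList <+: s.toList.drop j := by
    rw [← PySem.Chars.isIn_iff_infix, ← PySem.Chars.exists_prefix_drop_iff_isIn]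
  rw [h1]
  constructor
  · rintro ⟨j, hj⟩
    have hjlt : j < s.toList.length := by
      by_contra h
      rw [List.drop_eq_nil_of_le (by omega)] at hj
      exact hk (List.prefix_nil.mp hj)
    refine ⟨(j : Int), ?_, ?_⟩
    · rw [PySem.List.mem_pyRange_one]
      constructor
      · exact Int.natCast_nonneg j
      · simp [PySem.Str.len]; exact_mod_cast hjlt
    · rw [PySem.Chars.startswith_iff]; simpa using hj
  · rintro ⟨i, _, hsw⟩
    exact ⟨i.toNat, (PySem.Chars.startswith_iff _ _).mp hsw⟩

-- ===== VERDICT (by name: the statement is the Claim_ definition above) =====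
set_option maxHeartbeats 1000000 in
theorem map_lob_to_canonical_py_spec : Claim_equal_map_lob_to_canonical_py := by
  intro lob _
  unfold Spec_map_lob_to_canonical_py map_lob_to_canonical_py map_lob_to_canonical_py_alt
  dsimp only
  set low := PySem.Str.lower lob with hlow
  set idxs := PySem.List.pyRange 0 (PySem.Str.len low) 1 with hidxs
  set best := idxs.foldl
    (fun b i => pvRankedKws.foldl
      (fun b p =>
        if p.2 < b ∧ PySem.Chars.startswith (low.toList.drop i.toNat) p.1.toList = true
        then p.2 else b) b) 3 with hbest
  -- bridge each rank to "a keyword of that rank matched"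
  have hiff : ∀ r : Nat, r < 3 → (best ≤ r ↔ ∃ p ∈ pvRankedKws, p.2 ≤ r ∧ PySem.Str.isIn p.1 low = true) := by
    intro r hr
    rw [hbest, pvBest_le_iff]
    constructor
    · rintro (h1 | ⟨p, hp, h2, hmatch⟩)
      · omega
      · refine ⟨p, hp, h2, ?_⟩
        have hk : p.1.toList ≠ [] := by fin_cases hp <;> decide
        exact (pvIsIn_iff_pos p.1 low hk).mpr hmatch
    · rintro ⟨p, hp, h2, hin⟩
      have hk : p.1.toList ≠ [] := by fin_cases hp <;> decide
      exact Or.inr ⟨p, hp, h2, (pvIsIn_iff_pos p.1 low hk).mp hin⟩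
  by_cases c0 : ["medicare", "part a", "part b", "part c", "part d"].any (fun x => PySem.Str.isIn x low) = true
  · have hb0 : best = 0 := by
      have := (hiff 0 (by omega)).mpr ?_
      · omega
      · simp only [List.any_eq_true] at c0
        obtain ⟨x, hx, hin⟩ := c0
        refine ⟨(x, 0), ?_, le_refl _, hin⟩
        fin_cases hx <;> decide
    rw [if_pos c0, hb0]
    simp [PySem.List.pyGet?, PySem.List.pyIdx?, pvLobLabels]
  · by_cases c1 : ["medicaid", "medi-cal"].any (fun x => PySem.Str.isIn x low) = true
    · have hb1 : best = 1 := by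
        have hle : best ≤ 1 := by
          apply (hiff 1 (by omega)).mpr
          simp only [List.any_eq_true] at c1
          obtain ⟨x, hx, hin⟩ := c1
          refine ⟨(x, 1), ?_, by omega, hin⟩
          fin_cases hx <;> decide
        have hgt : ¬ best ≤ 0 := by
          intro h
          obtain ⟨p, hp, h2, hin⟩ := (hiff 0 (by omega)).mp h
          apply c0
          simp only [List.any_eq_true]
          fin_cases hp <;> first | (refine ⟨_, ?_, hin⟩; decide) | omega
        omega
      rw [if_neg c0, if_pos c1, hb1]
      simp [PySem.List.pyGet?, PySem.List.pyIdx?, pvLobLabels]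
    · by_cases c2 : ["commercial", "hmo", "ppo", "epo", "pos", "exchange"].any (fun x => PySem.Str.isIn x low) = true
      · have hb2 : best = 2 := by
          have hle : best ≤ 2 := by
            apply (hiff 2 (by omega)).mpr
            simp only [List.any_eq_true] at c2
            obtain ⟨x, hx, hin⟩ := c2
            refine ⟨(x, 2), ?_, le_refl _, hin⟩
            fin_cases hx <;> decide
          have hgt : ¬ best ≤ 1 := by
            intro h
            obtain ⟨p, hp, h2, hin⟩ := (hiff 1 (by omega)).mp h
            fin_cases hp <;>
              first
                | (refine absurd ?_ c0; simp only [List.any_eq_true]; refine ⟨_, ?_, hin⟩; decide)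
                | (refine absurd ?_ c1; simp only [List.any_eq_true]; refine ⟨_, ?_, hin⟩; decide)
                | omega
          omega
        rw [if_neg c0, if_neg c1, if_pos c2, hb2]
        simp [PySem.List.pyGet?, PySem.List.pyIdx?, pvLobLabels]
      · have hb3 : ¬ best < 3 := by
          intro h
          obtain ⟨p, hp, h2, hin⟩ := (hiff 2 (by omega)).mp (by omega)
          fin_cases hp <;>
            first
              | (refine absurd ?_ c0; simp only [List.any_eq_true]; refine ⟨_, ?_, hin⟩; decide)
              | (refine absurd ?_ c1; simp only [List.any_eq_true]; refine ⟨_, ?_, hin⟩; decide)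
              | (refine absurd ?_ c2; simp only [List.any_eq_true]; refine ⟨_, ?_, hin⟩; decide)
        rw [if_neg c0, if_neg c1, if_neg c2, if_neg hb3]
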